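-- pv_equiv track=rewrite | github.com/joshua04d/rosdl_libs_onli | data_gen_module.py | generate_pid_column
-- ===== SOURCE A (Python) =====
-- def generate_pid_column(n, existing_ids=None):
--     existing_ids = existing_ids or set()
--     new_ids = []
--     current = max(existing_ids) + 1 if existing_ids else 10000  # start PID at 10,000
--     while len(new_ids) < n:
--         if current not in existing_ids:
--             new_ids.append(current)
--             current += 1
--         else:
--             current += 1
--     return new_ids
-- ===== SOURCE B (Python) =====
-- def generate_pid_column(n, existing_ids=None):
--     existing_ids = existing_ids or set()
--     start = max(existing_ids) + 1 if existing_ids else 10000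
--     return list(range(start, start + n))
-- ===== Notes on version B (the rewrite author's own statement) =====
-- stated objective: simpler
-- what changed: Since the start value already exceeds every existing id, the while loop with its membership test is replaced by a closed-form list(range(start, start+n)).
import Mathlib
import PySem

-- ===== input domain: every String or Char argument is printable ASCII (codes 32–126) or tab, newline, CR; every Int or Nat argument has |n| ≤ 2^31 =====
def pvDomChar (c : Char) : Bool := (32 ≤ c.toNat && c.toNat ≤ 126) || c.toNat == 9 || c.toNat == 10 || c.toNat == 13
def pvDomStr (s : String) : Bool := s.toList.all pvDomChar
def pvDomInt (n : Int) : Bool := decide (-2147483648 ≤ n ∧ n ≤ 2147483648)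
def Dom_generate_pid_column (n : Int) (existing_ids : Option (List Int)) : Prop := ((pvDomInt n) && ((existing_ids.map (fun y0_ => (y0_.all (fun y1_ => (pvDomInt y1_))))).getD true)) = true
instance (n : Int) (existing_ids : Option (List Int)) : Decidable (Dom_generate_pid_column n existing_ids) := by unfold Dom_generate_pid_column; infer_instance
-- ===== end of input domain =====

-- B replaces A's while loop (whose membership test can never fire, since the start
-- already exceeds every existing id) by the closed form list(range(start, start+n)).
-- ===== PORT A =====
-- existing_ids = existing_ids or set()   (None or an empty list is falsy)
def pvIdsA (existing_ids : Option (List Int)) : List Int :=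
  match existing_ids with
  | none => []
  | some l => if l.isEmpty then [] else l

-- A's while loop as fuelled recursion; fuel n.toNat + s.length always suffices (at most
-- s.length skips can ever occur since current strictly increases).
def pvLoopA (s : List Int) (n : Int) : Nat → List Int → Int → List Int
  | 0, acc, _ => acc
  | fuel+1, acc, current =>
    if (acc.length : Int) < n then
      if s.contains current = false then pvLoopA s n fuel (acc ++ [current]) (current + 1)
      else pvLoopA s n fuel acc (current + 1)
    else acc

def generate_pid_column (n : Int) (existing_ids : Option (List Int)) : List Int :=
  pvLoopA (pvIdsA existing_ids) n (n.toNat + (pvIdsA existing_ids).length) []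
    -- current = max(existing_ids) + 1 if existing_ids else 10000
    (if (pvIdsA existing_ids).isEmpty then 10000
     else (PySem.List.max? (pvIdsA existing_ids) (fun x => x)).getD 0 + 1)

-- ===== PORT B =====
-- existing_ids = existing_ids or set()
def pvIdsB (existing_ids : Option (List Int)) : List Int :=
  match existing_ids with
  | none => []
  | some l => if l.isEmpty then [] else l

-- start = max(existing_ids) + 1 if existing_ids else 10000
def pvStartB (s : List Int) : Int :=
  if s.isEmpty then 10000 else (PySem.List.max? s (fun x => x)).getD 0 + 1

-- return list(range(start, start + n))
def generate_pid_column_alt (n : Int) (existing_ids : Option (List Int)) : List Int :=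
  PySem.List.pyRange (pvStartB (pvIdsB existing_ids)) (pvStartB (pvIdsB existing_ids) + n) 1

-- ===== PRECONDITION & SPEC =====
def Spec_generate_pid_column (n : Int) (existing_ids : Option (List Int)) (out : List Int) : Prop := out = generate_pid_column_alt n existing_ids
instance (n : Int) (existing_ids : Option (List Int)) (out : List Int) : Decidable (Spec_generate_pid_column n existing_ids out) := by unfold Spec_generate_pid_column; infer_instance

-- ===== CLAIM (what is proved, stated in full; the proofs are below) =====
def Claim_equal_generate_pid_column : Prop := ∀ (n : Int) (existing_ids : Option (List Int)), Dom_generate_pid_column n existing_ids → Spec_generate_pid_column n existing_ids (generate_pid_column n existing_ids)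

-- ===== LEMMAS AND PROOFS =====

-- Loop invariant: once every element of s is below current, the loop only ever takes the
-- "append" branch, producing the consecutive range of the next (n - |acc|) integers.
theorem pvLoopA_eq_range (s : List Int) (n : Int) :
    ∀ (fuel : Nat) (acc : List Int) (current : Int),
      (∀ x ∈ s, x < current) → n - acc.length ≤ fuel →
      pvLoopA s n fuel acc current = acc ++ PySem.List.pyRange current (current + (n - acc.length)) 1 := by
  intro fuel
  induction fuel with
  | zero =>
    intro acc current _ hf
    have : current + (n - acc.length) ≤ current := by omega
    simp [pvLoopA, PySem.List.pyRange_one_eq_nil this]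
  | succ f ih =>
    intro acc current hlt hf
    by_cases h : (acc.length : Int) < n
    · have hnot : s.contains current = false := by
        simp only [List.contains_eq_mem, decide_eq_false_iff_not]
        intro hc
        exact absurd (hlt current hc) (lt_irrefl current)
      rw [pvLoopA, if_pos h, if_pos hnot]
      have hlt' : ∀ x ∈ s, x < current + 1 := fun x hx => by have := hlt x hx; omega
      have hf' : n - ((acc ++ [current]).length : Int) ≤ f := by simp; omega
      rw [ih (acc ++ [current]) (current + 1) hlt' hf']
      have hcons : PySem.List.pyRange current (current + (n - acc.length)) 1
          = current :: PySem.List.pyRange (current + 1) (current + (n - acc.length)) 1 :=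
        PySem.List.pyRange_one_cons (by omega)
      have hstop : (current + 1) + (n - ((acc ++ [current]).length : Int)) = current + (n - acc.length) := by
        simp; omega
      rw [hstop, hcons]
      simp
    · rw [pvLoopA, if_neg h]
      have : current + (n - acc.length) ≤ current := by omega
      simp [PySem.List.pyRange_one_eq_nil this]

-- The start value strictly exceeds every existing id.
theorem pvStart_gt (s : List Int) :
    ∀ x ∈ s, x < (if s.isEmpty then 10000 else (PySem.List.max? s (fun x => x)).getD 0 + 1) := by
  intro x hx
  have hne : ¬ s.isEmpty := by
    cases s with
    | nil => simp at hx
    | cons a t => simp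
  rw [if_neg hne]
  cases hm : PySem.List.max? s (fun x => x) with
  | none =>
    have : s = [] := (PySem.List.max?_eq_none_iff s (fun x => x)).mp hm
    subst this; simp at hx
  | some m =>
    have := PySem.List.max?_isMax hm x hx
    simp only [Option.getD_some]
    omega

-- ===== VERDICT (by name: the statement is the Claim_ definition above) =====
theorem generate_pid_column_spec : Claim_equal_generate_pid_column := by
  intro n existing_ids _
  unfold Spec_generate_pid_column generate_pid_column generate_pid_column_alt pvStartB pvIdsB pvIdsA
  rw [pvLoopA_eq_range _ n _ [] _ (pvStart_gt _) (by simp; omega)]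
  simp
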